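-- pv_equiv track=rewrite | github.com/freedomkite/ner | load1.py | pre_lines
-- ===== SOURCE A (Python) =====
-- def pre_lines(lines):
--     data=[]
--     for lin in lines:
--         word=[]
--         tag=[]
--         tmp=lin.split()
--         for t in tmp:
--             ind=t.index('/')
--             word.append(t[:ind])
--             tag.append(t[ind+1:])
--         data.append((word,tag))
--     return data
-- ===== SOURCE B (Python) =====
-- def pre_lines(lines):
--     # Character-level state machine per line: no split(), no index(), no slicing.
--     # A trailing space sentinel flushes the last token.  A token that ends
--     # without any '/' is malformed (word with no tag): rejected, as in A.
--     data = []
--     for lin in lines: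
--         words, tags = [], []
--         cur = []       # chars of the current token before its first '/'
--         cur2 = None    # chars after the first '/' (None while no '/' seen yet)
--         for ch in lin + ' ':
--             if ch.isspace():
--                 if cur2 is not None:
--                     words.append(''.join(cur))
--                     tags.append(''.join(cur2))
--                     cur, cur2 = [], None
--                 elif cur:
--                     raise ValueError("token without '/'")
--             elif cur2 is None and ch == '/':
--                 cur2 = []
--             elif cur2 is None:
--                 cur.append(ch)
--             else:
--                 cur2.append(ch)
--         data.append((words, tags))
--     return data
-- ===== Notes on version B (the rewrite author's own statement) =====
-- stated objective: alternative
-- what changed: B replaces A's split()/index()/slicing token pipeline with a per-line character-level state machine (with a trailing-space sentinel) that accumulates word and tag characters directly, never materialising tokens.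
import Mathlib
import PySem

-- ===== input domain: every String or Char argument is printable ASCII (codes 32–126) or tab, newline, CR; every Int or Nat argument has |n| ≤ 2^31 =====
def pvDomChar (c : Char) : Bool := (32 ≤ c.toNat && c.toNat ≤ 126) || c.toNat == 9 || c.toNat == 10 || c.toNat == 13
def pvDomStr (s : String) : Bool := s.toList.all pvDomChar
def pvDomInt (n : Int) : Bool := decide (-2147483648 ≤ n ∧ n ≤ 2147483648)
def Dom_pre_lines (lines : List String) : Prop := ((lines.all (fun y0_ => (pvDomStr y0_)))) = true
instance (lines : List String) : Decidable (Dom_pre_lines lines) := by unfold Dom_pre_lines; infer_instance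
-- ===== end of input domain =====

-- B replaces split()+index()+slicing by a per-line character-level state machine; not faster, a different algorithm.

-- ===== PORT A =====
-- outer loop: data accumulator; inner loop state: the two lists (word, tag);
-- t.index('/') ported as PySem.Str.find (exact on Pre_: every token contains '/')
def pre_lines (lines : List String) : List (List String × List String) :=
  lines.foldl (fun data lin =>
    let tmp := PySem.Str.split₀ lin
    let wt := tmp.foldl (fun (wt : List String × List String) t =>
      let ind := PySem.Str.find t "/"
      (wt.1 ++ [PySem.Str.slice t none (some ind)],
       wt.2 ++ [PySem.Str.slice t (some (ind + 1)) none])) ([], [])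
    data ++ [wt]) []

-- ===== PORT B =====
-- one step of B's character machine: state = ((words, tags), (cur, cur2))
def pvStep (st : (List String × List String) × (List Char × Option (List Char))) (c : Char) :
    (List String × List String) × (List Char × Option (List Char)) :=
  let ((ws, ts), (cur, cur2)) := st
  if PySem.Chars.isspace c then
    match cur2 with
    | some g => ((ws ++ [String.ofList cur], ts ++ [String.ofList g]), ([], none))
    | none => st  -- with cur ≠ [] Python B raises ValueError here (outside Pre_); the port keeps the state, no value is claimed there
  else if cur2.isNone && (c == '/') then ((ws, ts), (cur, some []))
  else match cur2 with
    | none => ((ws, ts), (cur ++ [c], none))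
    | some g => ((ws, ts), (cur, some (g ++ [c])))

-- scan one line, with the trailing-space sentinel that flushes the last token
def pvScanLine (lin : String) : List String × List String :=
  ((lin.toList ++ [' ']).foldl pvStep (([], []), ([], none))).1

def pre_lines_alt (lines : List String) : List (List String × List String) :=
  lines.map pvScanLine

-- ===== PRECONDITION & SPEC =====
-- Pre_ excludes inputs where some whitespace-separated token has no '/':
-- there Python A raises ValueError (t.index), and Python B raises ValueError too.
def Pre_pre_lines (lines : List String) : Prop :=
  (lines.all (fun lin => (PySem.Str.split₀ lin).all (fun t => PySem.Str.isIn "/" t))) = true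
instance (lines : List String) : Decidable (Pre_pre_lines lines) := by unfold Pre_pre_lines; infer_instance
def pvWitness_pre_lines : List String := ["a/b c/d", "", "x/ /y"]

def Spec_pre_lines (lines : List String) (out : List (List String × List String)) : Prop := out = pre_lines_alt lines
instance (lines : List String) (out : List (List String × List String)) : Decidable (Spec_pre_lines lines out) := by unfold Spec_pre_lines; infer_instance

-- ===== CLAIM (what is proved, stated in full; the proofs are below) =====
def Claim_equal_pre_lines : Prop := ∀ (lines : List String), Dom_pre_lines lines → Pre_pre_lines lines → Spec_pre_lines lines (pre_lines lines)

-- ===== LEMMAS AND PROOFS =====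

-- the word/tag A extracts from a token, on the List Char side
def pvWordF (t : List Char) : String := String.ofList (t.take (PySem.Chars.find t ['/']).toNat)
def pvTagF (t : List Char) : String := String.ofList (t.drop ((PySem.Chars.find t ['/']).toNat + 1))

-- the token B's machine state currently represents
def pvTok (cur : List Char) (cur2 : Option (List Char)) : List Char :=
  match cur2 with
  | none => cur
  | some g => cur ++ '/' :: g

theorem pvSingletonInfix (c : Char) (l : List Char) : [c] <:+: l ↔ c ∈ l := by
  constructor
  · rintro ⟨s, t, rfl⟩; simp
  · intro h
    obtain ⟨s, t, rfl⟩ := List.append_of_mem h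
    exact ⟨s, t, by simp⟩

theorem pvFindGo (cur g : List Char) (k : Nat) (h : '/' ∉ cur) :
    PySem.Chars.find.go ['/'] (cur ++ '/' :: g) k = (k : Int) + cur.length := by
  induction cur generalizing k with
  | nil => simp [PySem.Chars.find.go, List.isPrefixOf]
  | cons c cs ih =>
    simp only [List.mem_cons, not_or] at h
    rw [List.cons_append, PySem.Chars.find.go]
    have hpre : (['/'].isPrefixOf (c :: (cs ++ '/' :: g))) = false := by
      simp [List.isPrefixOf]
      exact h.1
    rw [hpre]
    simp only [Bool.false_eq_true, if_false]
    rw [ih (k + 1) h.2]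
    simp only [List.length_cons]
    push_cast; ring

theorem pvFindTok (cur g : List Char) (h : '/' ∉ cur) :
    PySem.Chars.find (cur ++ '/' :: g) ['/'] = (cur.length : Int) := by
  unfold PySem.Chars.find
  rw [pvFindGo cur g 0 h]; simp

-- accumulator lemma for split₀.go
theorem pvGoAcc (cs : List Char) (cur : List Char) (acc : List (List Char)) :
    PySem.Chars.split₀.go cs cur acc = acc.reverse ++ PySem.Chars.split₀.go cs cur [] := by
  induction cs generalizing cur acc with
  | nil =>
    by_cases h : cur.isEmpty <;> simp [PySem.Chars.split₀.go, h]
  | cons c cs ih =>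
    by_cases hs : PySem.Chars.isspace c
    · by_cases hc : cur.isEmpty
      · rw [PySem.Chars.split₀.go, PySem.Chars.split₀.go]
        simp only [hs, hc, if_true]
        exact ih [] acc
      · rw [PySem.Chars.split₀.go, PySem.Chars.split₀.go]
        simp only [hs, hc, if_true, Bool.false_eq_true, if_false]
        rw [ih, ih [] [cur.reverse]]
        simp
    · rw [PySem.Chars.split₀.go, PySem.Chars.split₀.go]
      simp only [hs, Bool.false_eq_true, if_false]
      exact ih (c :: cur) acc

-- A's word/tag extraction on a token 'cur ++ '/' :: g' with no '/' in cur
theorem pvTokWord (cur g : List Char) (h : '/' ∉ cur) :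
    pvWordF (cur ++ '/' :: g) = String.ofList cur ∧ pvTagF (cur ++ '/' :: g) = String.ofList g := by
  unfold pvWordF pvTagF
  rw [pvFindTok cur g h]
  have h2 : cur ++ '/' :: g = (cur ++ ['/']) ++ g := by simp
  constructor
  · congr 1
    simp
  · congr 1
    rw [h2]
    have h3 : cur.length + 1 = (cur ++ ['/']).length := by simp
    simp only [Int.toNat_natCast, h3, List.drop_left]

theorem pvMachine (cs : List Char) (ws ts : List String) (cur : List Char)
    (cur2 : Option (List Char)) (hcur : '/' ∉ cur)
    (htok : ∀ t ∈ PySem.Chars.split₀.go cs (pvTok cur cur2).reverse [], '/' ∈ t) :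
    ((cs ++ [' ']).foldl pvStep ((ws, ts), (cur, cur2))).1
      = (ws ++ (PySem.Chars.split₀.go cs (pvTok cur cur2).reverse []).map pvWordF,
         ts ++ (PySem.Chars.split₀.go cs (pvTok cur cur2).reverse []).map pvTagF) := by
  have hsp : PySem.Chars.isspace ' ' = true := by decide
  induction cs generalizing ws ts cur cur2 with
  | nil =>
    cases cur2 with
    | none =>
      cases cur with
      | nil => simp [pvTok, PySem.Chars.split₀.go, pvStep, hsp]
      | cons c' cs' =>
        refine absurd (htok (c' :: cs') ?_) hcur
        rw [PySem.Chars.split₀.go]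
        simp [pvTok]
    | some g =>
      have hw := pvTokWord cur g hcur
      rw [PySem.Chars.split₀.go]
      simp [pvTok, pvStep, hsp, hw.1, hw.2]
  | cons c cs ih =>
    by_cases hs : PySem.Chars.isspace c
    · cases cur2 with
      | none =>
        cases cur with
        | nil =>
          rw [List.cons_append, List.foldl_cons, PySem.Chars.split₀.go]
          simp only [pvTok, List.reverse_nil, List.isEmpty_nil, if_true, hs]
          have := ih ws ts [] none hcur
          simp only [pvTok, List.reverse_nil] at this
          rw [show pvStep ((ws, ts), ([], none)) c = ((ws, ts), ([], none)) by simp [pvStep, hs]]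
          apply this
          intro t ht
          apply htok
          rw [PySem.Chars.split₀.go]
          simpa [pvTok, hs] using ht
        | cons c' cs' =>
          refine absurd (htok (c' :: cs') ?_) hcur
          rw [PySem.Chars.split₀.go]
          simp only [pvTok, hs, if_true, List.isEmpty_reverse, List.isEmpty_cons, Bool.false_eq_true, if_false]
          rw [pvGoAcc]
          simp
      | some g =>
        have hw := pvTokWord cur g hcur
        rw [List.cons_append, List.foldl_cons, PySem.Chars.split₀.go]
        have hne : ((pvTok cur (some g)).reverse).isEmpty = false := by simp [pvTok]
        simp only [hs, if_true, hne, Bool.false_eq_true, if_false]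
        rw [pvGoAcc cs [] [(pvTok cur (some g)).reverse.reverse]]
        rw [show pvStep ((ws, ts), (cur, some g)) c
              = ((ws ++ [String.ofList cur], ts ++ [String.ofList g]), ([], none)) by
            simp [pvStep, hs]]
        have := ih (ws ++ [String.ofList cur]) (ts ++ [String.ofList g]) [] none (by simp)
        simp only [pvTok, List.reverse_nil] at this
        rw [this]
        · simp [pvTok, hw.1, hw.2]
        · intro t ht
          apply htok
          rw [PySem.Chars.split₀.go]
          simp only [hs, if_true, hne, Bool.false_eq_true, if_false]
          rw [pvGoAcc cs [] [(pvTok cur (some g)).reverse.reverse]]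
          simp only [List.reverse_cons, List.reverse_nil, List.nil_append, List.mem_append]
          right
          exact ht
    · rw [List.cons_append, List.foldl_cons, PySem.Chars.split₀.go]
      simp only [hs, Bool.false_eq_true, if_false]
      cases cur2 with
      | none =>
        by_cases hc : c = '/'
        · subst hc
          rw [show pvStep ((ws, ts), (cur, none)) '/' = ((ws, ts), (cur, some [])) by
              simp [pvStep, hs]]
          have := ih ws ts cur (some []) hcur
          simp only [pvTok] at this ⊢
          rw [show '/' :: cur.reverse = (cur ++ '/' :: ([] : List Char)).reverse by simp]
          apply this
          intro t ht
          apply htok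
          rw [PySem.Chars.split₀.go]
          simp only [hs, Bool.false_eq_true, if_false]
          simpa using ht
        · rw [show pvStep ((ws, ts), (cur, none)) c = ((ws, ts), (cur ++ [c], none)) by
              simp [pvStep, hs, hc]]
          have := ih ws ts (cur ++ [c]) none (by simp [hcur]; exact fun e => hc e.symm)
          simp only [pvTok] at this ⊢
          rw [show c :: cur.reverse = (cur ++ [c]).reverse by simp]
          apply this
          intro t ht
          apply htok
          rw [PySem.Chars.split₀.go]
          simp only [hs, Bool.false_eq_true, if_false]
          simpa using ht
      | some g =>
        rw [show pvStep ((ws, ts), (cur, some g)) c = ((ws, ts), (cur, some (g ++ [c]))) by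
            simp [pvStep, hs]]
        have := ih ws ts cur (some (g ++ [c])) hcur
        simp only [pvTok] at this ⊢
        rw [show c :: (cur ++ '/' :: g).reverse = (cur ++ '/' :: (g ++ [c])).reverse by simp]
        apply this
        intro t ht
        apply htok
        rw [PySem.Chars.split₀.go]
        simp only [hs, Bool.false_eq_true, if_false]
        simpa [pvTok] using ht


-- per line: B's scan equals A's per-token word/tag extraction over split₀
theorem pvScanEq (lin : String)
    (hP : ∀ t ∈ PySem.Str.split₀ lin, PySem.Str.isIn "/" t = true) :
    pvScanLine lin
      = ((PySem.Chars.split₀ lin.toList).map pvWordF,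
         (PySem.Chars.split₀ lin.toList).map pvTagF) := by
  unfold pvScanLine
  have htok : ∀ t ∈ PySem.Chars.split₀.go lin.toList (pvTok [] none).reverse [], '/' ∈ t := by
    intro t ht
    have hmem : String.ofList t ∈ PySem.Str.split₀ lin := by
      unfold PySem.Str.split₀
      exact List.mem_map_of_mem (by simpa [pvTok, PySem.Chars.split₀] using ht)
    have h2 := hP (String.ofList t) hmem
    unfold PySem.Str.isIn at h2
    rw [show ("/" : String).toList = ['/'] from rfl, String.toList_ofList] at h2
    exact (pvSingletonInfix '/' t).mp ((PySem.Chars.isIn_iff_infix _ _).mp h2)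
  have := pvMachine lin.toList [] [] [] none (by simp) htok
  simpa [pvTok, PySem.Chars.split₀] using this

-- A's inner fold in closed form
theorem pvInner (ts : List String) (w g : List String) :
    ts.foldl (fun (wt : List String × List String) t =>
      let ind := PySem.Str.find t "/"
      (wt.1 ++ [PySem.Str.slice t none (some ind)],
       wt.2 ++ [PySem.Str.slice t (some (ind + 1)) none])) (w, g)
    = (w ++ ts.map (fun t => PySem.Str.slice t none (some (PySem.Str.find t "/"))),
       g ++ ts.map (fun t => PySem.Str.slice t (some (PySem.Str.find t "/" + 1)) none)) := by
  induction ts generalizing w g with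
  | nil => simp
  | cons t ts ih =>
    rw [List.foldl_cons, ih]
    simp

-- A's extraction on a token containing '/' equals pvWordF/pvTagF on its char list
theorem pvFindNonneg (t : String) (h : PySem.Str.isIn "/" t = true) :
    0 ≤ PySem.Chars.find t.toList ['/'] := by
  unfold PySem.Str.isIn at h
  rw [show ("/" : String).toList = ['/'] from rfl] at h
  exact (PySem.Chars.find_nonneg_iff _ _).mpr ((PySem.Chars.isIn_iff_infix _ _).mp h)

theorem pvSliceWord (t : String) (h : PySem.Str.isIn "/" t = true) :
    PySem.Str.slice t none (some (PySem.Str.find t "/")) = pvWordF t.toList := by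
  unfold PySem.Str.slice PySem.Str.find pvWordF
  rw [show ("/" : String).toList = ['/'] from rfl, PySem.Chars.slice_eq_listSlice,
      PySem.List.slice_to _ (pvFindNonneg t h)]

theorem pvSliceTag (t : String) (h : PySem.Str.isIn "/" t = true) :
    PySem.Str.slice t (some (PySem.Str.find t "/" + 1)) none = pvTagF t.toList := by
  unfold PySem.Str.slice PySem.Str.find pvTagF
  have h0 := pvFindNonneg t h
  rw [show ("/" : String).toList = ['/'] from rfl, PySem.Chars.slice_eq_listSlice,
      PySem.List.slice_from _ (by omega : (0:Int) ≤ PySem.Chars.find t.toList ['/'] + 1),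
      show (PySem.Chars.find t.toList ['/'] + 1).toNat = (PySem.Chars.find t.toList ['/']).toNat + 1 by omega]

-- per line: A's inner fold equals B's scan
theorem pvLine (lin : String)
    (hP : ∀ t ∈ PySem.Str.split₀ lin, PySem.Str.isIn "/" t = true) :
    ((PySem.Str.split₀ lin).foldl (fun (wt : List String × List String) t =>
      let ind := PySem.Str.find t "/"
      (wt.1 ++ [PySem.Str.slice t none (some ind)],
       wt.2 ++ [PySem.Str.slice t (some (ind + 1)) none])) ([], []))
    = pvScanLine lin := by
  rw [pvInner, pvScanEq lin hP]
  have hbr : (PySem.Str.split₀ lin).map String.toList = PySem.Chars.split₀ lin.toList :=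
    PySem.Str.split₀_map_toList lin
  rw [← hbr]
  simp only [List.map_map, List.nil_append]
  rw [Prod.mk.injEq]
  refine ⟨?_, ?_⟩
  · exact List.map_congr_left fun t ht => pvSliceWord t (hP t ht)
  · exact List.map_congr_left fun t ht => pvSliceTag t (hP t ht)

-- ===== VERDICT (by name: the statement is the Claim_ definition above) =====
theorem pvOuter (lines : List String) (acc : List (List String × List String))
    (hP : ∀ lin ∈ lines, ∀ t ∈ PySem.Str.split₀ lin, PySem.Str.isIn "/" t = true) :
    lines.foldl (fun data lin =>
      let tmp := PySem.Str.split₀ lin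
      let wt := tmp.foldl (fun (wt : List String × List String) t =>
        let ind := PySem.Str.find t "/"
        (wt.1 ++ [PySem.Str.slice t none (some ind)],
         wt.2 ++ [PySem.Str.slice t (some (ind + 1)) none])) ([], [])
      data ++ [wt]) acc
    = acc ++ lines.map pvScanLine := by
  induction lines generalizing acc with
  | nil => simp
  | cons lin rest ih =>
    rw [List.foldl_cons, ih _ (fun l hl => hP l (List.mem_cons_of_mem _ hl))]
    simp only [List.map_cons]
    rw [pvLine lin (hP lin (List.mem_cons_self))]
    simp

theorem pre_lines_spec : Claim_equal_pre_lines := by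
  intro lines _ hpre
  unfold Spec_pre_lines pre_lines pre_lines_alt
  unfold Pre_pre_lines at hpre
  rw [List.all_eq_true] at hpre
  exact pvOuter lines [] (fun lin hl => by
    have := hpre lin hl
    rw [List.all_eq_true] at this
    exact fun t ht => this t ht) |>.trans (by simp)
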